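-- pv_equiv track=rewrite | github.com/QuHarmonics/Nexus-4-Framework-Recursive-Harmonic-Architecture | Python Code - Raw Dump/Nexus 4 Framework -Hasing_2-checkpoint-code_3- Qu Harmonics.py | compress_binary
-- ===== SOURCE A (Python) =====
-- def compress_binary(binary_data):
--     """
--     Compress binary data using a combination of run-length encoding and base conversion.
--     """
--     # Run-Length Encoding
--     compressed = []
--     count = 1
--     for i in range(1, len(binary_data)):
--         if binary_data[i] == binary_data[i - 1]:
--             count += 1
--         else:
--             compressed.append((binary_data[i - 1], count))
--             count = 1
--     compressed.append((binary_data[-1], count))  # Add the last group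
--
--     # Convert RLE to a more compact base representation
--     compressed_string = "".join(f"{val}{count}" for val, count in compressed)
--     return compressed_string
-- ===== SOURCE B (Python) =====
-- def compress_binary(binary_data):
--     """
--     Compress binary data using run-length encoding, computed in stages:
--     run-start indices first, then tokens from consecutive index pairs.
--     """
--     n = len(binary_data)
--     starts = [i for i in range(n) if i == 0 or binary_data[i] != binary_data[i - 1]]
--     ends = starts[1:] + [n]
--     return "".join(binary_data[s] + str(e - s) for s, e in zip(starts, ends))
-- ===== Notes on version B (the rewrite author's own statement) =====
-- stated objective: alternative
-- what changed: Replaced A's single-pass running-counter loop (with its trailing last-group append) by staged passes: a comprehension collects the run-start indices, pairing that list with its shifted copy gives (start, end) per run, and each token is rendered from the index gap.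
-- outside the precondition, e.g. on compress_binary(''): A raises IndexError, B returns ''
-- crash fix: On the empty string A raises IndexError at binary_data[-1]; B returns the empty string. — e.g. on compress_binary(""): A raises IndexError, B returns ""
import Mathlib
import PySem

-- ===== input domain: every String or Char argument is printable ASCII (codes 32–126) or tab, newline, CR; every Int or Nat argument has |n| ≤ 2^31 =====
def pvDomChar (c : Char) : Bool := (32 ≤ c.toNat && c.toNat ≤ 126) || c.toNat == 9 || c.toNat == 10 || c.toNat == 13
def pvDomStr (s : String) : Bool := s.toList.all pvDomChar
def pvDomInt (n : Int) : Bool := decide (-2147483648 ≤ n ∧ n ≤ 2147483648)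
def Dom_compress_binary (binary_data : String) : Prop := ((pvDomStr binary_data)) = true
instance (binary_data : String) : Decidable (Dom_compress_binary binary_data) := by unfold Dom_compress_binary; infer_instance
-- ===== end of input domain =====

-- B replaces A's single-pass running-counter loop (with its trailing last-group
-- append) by staged passes: a comprehension collecting the run-start indices,
-- then tokens rendered from consecutive (start, end) index pairs; objective:
-- alternative (same cost, different decomposition).

-- ===== PORT A =====
-- A: for i in range(1, len): compare data[i] with data[i-1], keep a running
-- count, append finished (char, count) pairs; then append the last group via
-- data[-1] (IndexError on empty input: the 'none' branch, excluded by Pre_),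
-- then join f"{val}{count}".
def compress_binary (binary_data : String) : String :=
  let l := binary_data.toList
  let st := (PySem.List.pyRange 1 l.length 1).foldl
    (fun (st : List (Char × Int) × Int) i =>
      if PySem.List.pyGetD l i ' ' = PySem.List.pyGetD l (i - 1) ' ' then
        (st.1, st.2 + 1)
      else
        (st.1 ++ [(PySem.List.pyGetD l (i - 1) ' ', st.2)], 1))
    ([], 1)
  match PySem.List.pyGet? l (-1) with
  | none => ""  -- Python raises IndexError here; outside Pre_
  | some lastc =>
    let compressed := st.1 ++ [(lastc, st.2)]
    String.mk (compressed.foldl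
      (fun acc p => acc ++ p.1 :: (PySem.Int.toStr p.2).toList) [])

-- ===== PORT B =====
-- the comprehension's condition: i == 0 or binary_data[i] != binary_data[i-1]
def pvP (l : List Char) (i : Int) : Bool :=
  (i == 0) || !(PySem.List.pyGetD l i ' ' == PySem.List.pyGetD l (i - 1) ' ')

-- one generator token: binary_data[s] + str(e - s)
def pvTok (l : List Char) (p : Int × Int) : List Char :=
  PySem.List.pyGetD l p.1 ' ' :: (PySem.Int.toStr (p.2 - p.1)).toList

-- B: starts = [i for i in range(n) if i == 0 or data[i] != data[i-1]];
-- ends = starts[1:] + [n]; join data[s] + str(e - s) over zip(starts, ends).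
def compress_binary_alt (binary_data : String) : String :=
  let l := binary_data.toList
  let n : Int := (l.length : Int)
  let starts := (PySem.List.pyRange 0 n 1).filter (pvP l)
  let ends := (PySem.List.slice starts (some 1) none) ++ [n]
  String.mk ((starts.zip ends).foldl (fun acc p => acc ++ pvTok l p) [])

-- ===== PRECONDITION & SPEC =====
-- Pre_ excludes only the empty string, on which A raises IndexError.
def Pre_compress_binary (binary_data : String) : Prop := binary_data ≠ ""
instance (binary_data : String) : Decidable (Pre_compress_binary binary_data) := by
  unfold Pre_compress_binary; infer_instance
def pvWitness_compress_binary : String := "0011101"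

-- On the empty string A raises IndexError at binary_data[-1]; B returns "".
def Raises_compress_binary (binary_data : String) : Prop := binary_data = ""
instance (binary_data : String) : Decidable (Raises_compress_binary binary_data) := by
  unfold Raises_compress_binary; infer_instance
def pvRaiseWitness_compress_binary : String := ""
def pvRaiseWitnessOut_compress_binary : String := ""

def Spec_compress_binary (binary_data : String) (out : String) : Prop :=
  out = compress_binary_alt binary_data
instance (binary_data : String) (out : String) : Decidable (Spec_compress_binary binary_data out) := by
  unfold Spec_compress_binary; infer_instance

-- ===== CLAIM (what is proved, stated in full; the proofs are below) =====
def Claim_equal_compress_binary : Prop := ∀ (binary_data : String),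
  Dom_compress_binary binary_data → Pre_compress_binary binary_data →
  Spec_compress_binary binary_data (compress_binary binary_data)

def Claim_raises_compress_binary : Prop :=
  (∀ (binary_data : String), Dom_compress_binary binary_data →
    Raises_compress_binary binary_data → ¬ Pre_compress_binary binary_data) ∧
  (Dom_compress_binary pvRaiseWitness_compress_binary ∧
    Raises_compress_binary pvRaiseWitness_compress_binary ∧
    compress_binary_alt pvRaiseWitness_compress_binary = pvRaiseWitnessOut_compress_binary)

-- ===== LEMMAS AND PROOFS =====

-- run-length groups of 'c :: rest' where the current run has char c, count k
def pvGroupsFrom (c : Char) (k : Int) : List Char → List (Char × Int)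
  | [] => [(c, k)]
  | x :: xs => if x = c then pvGroupsFrom c (k + 1) xs else (c, k) :: pvGroupsFrom x 1 xs

-- the run-length groups of a list: (char, length) per maximal run
def pvGroupsB : List Char → List (Char × Int)
  | [] => []
  | c :: rest =>
    (c, 1 + ((rest.takeWhile (fun x => x == c)).length : Int))
      :: pvGroupsB (rest.dropWhile (fun x => x == c))
termination_by l => l.length
decreasing_by
  simp only [List.length_cons]
  exact Nat.lt_succ_of_le (List.length_dropWhile_le _ _)

def pvRender1 (p : Char × Int) : List Char := p.1 :: (PySem.Int.toStr p.2).toList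

-- absolute start positions of the groups, first group starting at off
def pvStartsOf (off : Int) : List (Char × Int) → List Int
  | [] => []
  | p :: gs => off :: pvStartsOf (off + p.2) gs

-- the comprehension's result, one element at a time: prev = last char before
-- the current position (none at position 0)
def pvSA (off : Int) (prev : Option Char) : List Char → List Int
  | [] => []
  | x :: xs =>
    if prev = some x then pvSA (off + 1) (some x) xs
    else off :: pvSA (off + 1) (some x) xs

lemma pvGroupsFrom_eq (l : List Char) : ∀ (c : Char) (k : Int),
    pvGroupsFrom c k l = (c, k + ((l.takeWhile (fun x => x == c)).length : Int))
        :: pvGroupsB (l.dropWhile (fun x => x == c)) := by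
  induction l with
  | nil => intro c k; simp [pvGroupsFrom, pvGroupsB]
  | cons x xs ih =>
    intro c k
    by_cases h : x = c
    · subst h
      rw [show pvGroupsFrom x k (x :: xs) = pvGroupsFrom x (k + 1) xs from if_pos rfl,
          ih x (k + 1)]
      simp only [List.takeWhile_cons, beq_self_eq_true, if_true, List.dropWhile_cons,
        List.length_cons, Nat.cast_add, Nat.cast_one]
      ring_nf
    · have hb : (x == c) = false := beq_false_of_ne h
      rw [show pvGroupsFrom c k (x :: xs) = (c, k) :: pvGroupsFrom x 1 xs from if_neg h,
          ih x 1]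
      simp [hb, pvGroupsB]

lemma pvGetD_append (pre ys : List Char) (y : Char) :
    PySem.List.pyGetD (pre ++ y :: ys) (pre.length : Int) ' ' = y := by
  simp [PySem.List.pyGetD]

lemma pvFoldA (rest : List Char) : ∀ (pre : List Char) (c : Char)
    (acc : List (Char × Int)) (k : Int),
    (let l := pre ++ c :: rest
     let st := (PySem.List.pyRange ((pre.length : Int) + 1) l.length).foldl
       (fun (st : List (Char × Int) × Int) i =>
         if PySem.List.pyGetD l i ' ' = PySem.List.pyGetD l (i - 1) ' ' then
           (st.1, st.2 + 1)
         else
           (st.1 ++ [(PySem.List.pyGetD l (i - 1) ' ', st.2)], 1))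
       (acc, k)
     st.1 ++ [((c :: rest).getLastD ' ', st.2)])
    = acc ++ pvGroupsFrom c k rest := by
  induction rest with
  | nil =>
    intro pre c acc k
    have hr : PySem.List.pyRange ((pre.length : Int) + 1) ((pre ++ [c]).length : Int) = [] := by
      apply PySem.List.pyRange_one_eq_nil
      simp
    simp only [hr, List.foldl_nil, pvGroupsFrom, List.getLastD_cons, List.getLastD_nil]
  | cons x xs ih =>
    intro pre c acc k
    have hlen : ((pre ++ c :: x :: xs).length : Int) = (pre.length : Int) + 2 + xs.length := by
      simp; omega
    have hcons : PySem.List.pyRange ((pre.length : Int) + 1) ((pre ++ c :: x :: xs).length : Int)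
        = ((pre.length : Int) + 1) :: PySem.List.pyRange ((pre.length : Int) + 1 + 1)
            ((pre ++ c :: x :: xs).length : Int) := by
      apply PySem.List.pyRange_one_cons
      rw [hlen]; omega
    have hx : PySem.List.pyGetD (pre ++ c :: x :: xs) ((pre.length : Int) + 1) ' ' = x := by
      have := pvGetD_append (pre ++ [c]) xs x
      simpa using this
    have hc : PySem.List.pyGetD (pre ++ c :: x :: xs) ((pre.length : Int) + 1 - 1) ' ' = c := by
      have := pvGetD_append pre (x :: xs) c
      simpa using this
    simp only [hcons, List.foldl_cons, hx, hc]
    by_cases h : x = c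
    · subst h
      rw [if_pos rfl, show pvGroupsFrom x k (x :: xs) = pvGroupsFrom x (k + 1) xs from if_pos rfl]
      have H := ih (pre ++ [x]) x acc (k + 1)
      simp only [List.append_assoc, List.cons_append, List.nil_append, List.length_append,
        List.length_cons, List.length_nil, List.getLastD_cons] at H ⊢
      push_cast at H ⊢
      ring_nf at H ⊢
      exact H
    · rw [if_neg h, show pvGroupsFrom c k (x :: xs) = (c, k) :: pvGroupsFrom x 1 xs from if_neg h]
      have H := ih (pre ++ [c]) x (acc ++ [(c, k)]) 1
      simp only [List.append_assoc, List.cons_append, List.nil_append, List.length_append,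
        List.length_cons, List.length_nil, List.getLastD_cons] at H ⊢
      push_cast at H ⊢
      ring_nf at H ⊢
      exact H.trans (by simp)

-- the comprehension's filter IS the element-at-a-time scan pvSA
lemma pvSA_eq (m : List Char) : ∀ (pre : List Char),
    (PySem.List.pyRange (pre.length : Int) (((pre ++ m).length : Int)) 1).filter
        (pvP (pre ++ m))
      = pvSA (pre.length : Int) pre.getLast? m := by
  induction m with
  | nil =>
    intro pre
    rw [List.append_nil, PySem.List.pyRange_one_eq_nil le_rfl]
    rfl
  | cons x xs ih =>
    intro pre
    have hlt : (pre.length : Int) < ((pre ++ x :: xs).length : Int) := by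
      simp only [List.length_append, List.length_cons]
      push_cast
      omega
    rw [PySem.List.pyRange_one_cons hlt, List.filter_cons]
    have htail : (PySem.List.pyRange ((pre.length : Int) + 1)
          (((pre ++ x :: xs).length : Int)) 1).filter (pvP (pre ++ x :: xs))
        = pvSA ((pre.length : Int) + 1) (some x) xs := by
      have H := ih (pre ++ [x])
      have e1 : ((pre ++ [x]).length : Int) = (pre.length : Int) + 1 := by simp
      rw [List.append_assoc, List.singleton_append, e1, List.getLast?_concat] at H
      exact H
    rcases List.eq_nil_or_concat pre with hpre | ⟨q, z, hpre⟩
    · subst hpre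
      have hp : pvP ([] ++ x :: xs) ((List.length ([] : List Char) : Int)) = true := by
        simp [pvP]
      rw [hp, htail]
      simp [pvSA]
    · rw [List.concat_eq_append] at hpre
      subst hpre
      have hz : PySem.List.pyGetD ((q ++ [z]) ++ x :: xs) (((q ++ [z]).length : Int) - 1) ' '
          = z := by
        rw [List.append_assoc, List.singleton_append,
          show ((q ++ [z]).length : Int) - 1 = (q.length : Int) by simp]
        exact pvGetD_append q (x :: xs) z
      have hx' : PySem.List.pyGetD ((q ++ [z]) ++ x :: xs) (((q ++ [z]).length : Int)) ' '
          = x := pvGetD_append (q ++ [z]) xs x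
      have h0 : (((q ++ [z]).length : Int) == 0) = false := by
        simp
        omega
      have hp : pvP ((q ++ [z]) ++ x :: xs) (((q ++ [z]).length : Int)) = !(x == z) := by
        unfold pvP
        rw [hx', hz, h0, Bool.false_or]
      rw [hp, List.getLast?_concat]
      by_cases hxz : x = z
      · subst hxz
        rw [if_neg (by simp), htail,
          show pvSA (((q ++ [x]).length : Int)) (some x) (x :: xs)
            = pvSA (((q ++ [x]).length : Int) + 1) (some x) xs from if_pos rfl]
      · have hb : (x == z) = false := beq_false_of_ne hxz
        have hne : (some z : Option Char) ≠ some x := by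
          intro h
          exact hxz (Option.some_inj.mp h).symm
        rw [if_pos (by simp [hb]), htail,
          show pvSA (((q ++ [z]).length : Int)) (some z) (x :: xs)
            = ((q ++ [z]).length : Int)
                :: pvSA (((q ++ [z]).length : Int) + 1) (some x) xs from if_neg hne]

-- inside a run the scan only advances the offset
lemma pvSA_run (t : List Char) : ∀ (c : Char) (d : List Char) (a : Int),
    (∀ x ∈ t, x = c) →
    pvSA a (some c) (t ++ d) = pvSA (a + (t.length : Int)) (some c) d := by
  induction t with
  | nil => intro c d a _; simp
  | cons x ts ih =>
    intro c d a h
    have hx : x = c := h x (by simp)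
    subst hx
    rw [List.cons_append, show pvSA a (some x) (x :: (ts ++ d))
        = pvSA (a + 1) (some x) (ts ++ d) from if_pos rfl,
      ih x d (a + 1) (fun y hy => h y (by simp [hy]))]
    congr 1
    simp only [List.length_cons, Nat.cast_add, Nat.cast_one]
    ring

-- the scan's output = the absolute start positions of the groups
lemma pvSA_groups (m : List Char) : ∀ (off : Int) (prev : Option Char),
    (∀ c r, m = c :: r → prev ≠ some c) →
    pvSA off prev m = pvStartsOf off (pvGroupsB m) := by
  induction m using pvGroupsB.induct with
  | case1 => intro off prev _; simp [pvSA, pvGroupsB, pvStartsOf]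
  | case2 c rest ih =>
    intro off prev hmis
    have hne : prev ≠ some c := hmis c rest rfl
    rw [show pvSA off prev (c :: rest) = off :: pvSA (off + 1) (some c) rest from if_neg hne]
    have hsplit : rest = rest.takeWhile (fun x => x == c) ++ rest.dropWhile (fun x => x == c) :=
      (List.takeWhile_append_dropWhile).symm
    rw [show pvSA (off + 1) (some c) rest
        = pvSA (off + 1) (some c)
            (rest.takeWhile (fun x => x == c) ++ rest.dropWhile (fun x => x == c)) by
          rw [← hsplit],
      pvSA_run _ c _ _ (fun x hx => by simpa using List.mem_takeWhile_imp hx),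
      ih]
    · rw [pvGroupsB]
      simp only [pvStartsOf]
      congr 2
      ring
    · intro c' r' hdd
      intro hcc
      have hnil : rest.dropWhile (fun x => x == c) ≠ [] := by simp [hdd]
      have hhead := List.head_dropWhile_not (fun x => x == c) hnil
      have hcv : (rest.dropWhile (fun x => x == c)).head hnil = c' := by
        have h2 : (rest.dropWhile (fun x => x == c)).head? = some c' := by rw [hdd]; rfl
        rwa [List.head?_eq_some_head hnil, Option.some_inj] at h2
      rw [hcv] at hhead
      exact absurd (Option.some_inj.mp hcc).symm (by simpa using hhead)

-- rendering the zipped (start, end) pairs = rendering the groups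
lemma pvRZ (m : List Char) : ∀ (pre : List Char),
    ((pvStartsOf (pre.length : Int) (pvGroupsB m)).zip
        ((pvStartsOf (pre.length : Int) (pvGroupsB m)).tail
          ++ [(((pre ++ m).length : Int))])).flatMap (pvTok (pre ++ m))
      = (pvGroupsB m).flatMap pvRender1 := by
  induction m using pvGroupsB.induct with
  | case1 => intro pre; simp [pvGroupsB, pvStartsOf]
  | case2 c rest ih =>
    intro pre
    have hsplit : rest = rest.takeWhile (fun x => x == c) ++ rest.dropWhile (fun x => x == c) :=
      (List.takeWhile_append_dropWhile).symm
    have hc : PySem.List.pyGetD (pre ++ c :: rest) (pre.length : Int) ' ' = c :=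
      pvGetD_append pre rest c
    rw [pvGroupsB]
    cases hd : rest.dropWhile (fun x => x == c) with
    | nil =>
      have hrest : rest = rest.takeWhile (fun x => x == c) := by
        conv_lhs => rw [hsplit]
        rw [hd, List.append_nil]
      have hlen : ((pre ++ c :: rest).length : Int) - (pre.length : Int)
          = 1 + ((rest.takeWhile (fun x => x == c)).length : Int) := by
        conv_lhs => rw [hrest]
        simp
        omega
      simp only [pvGroupsB, pvStartsOf, List.tail_cons, List.nil_append, List.zip_cons_cons,
        List.zip_nil_left, List.flatMap_cons, List.flatMap_nil, List.append_nil,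
        pvTok, pvRender1, hc, hlen]
    | cons c' r' =>
      obtain ⟨g, gs, hG⟩ : ∃ g gs, pvGroupsB (rest.dropWhile (fun x => x == c)) = g :: gs := by
        rw [hd, pvGroupsB]
        exact ⟨_, _, rfl⟩
      have hL2 : pre ++ c :: rest
          = (pre ++ c :: rest.takeWhile (fun x => x == c)) ++ rest.dropWhile (fun x => x == c) := by
        conv_lhs => rw [hsplit]
        simp
      have hoff : ((pre ++ c :: rest.takeWhile (fun x => x == c)).length : Int)
          = (pre.length : Int) + (1 + ((rest.takeWhile (fun x => x == c)).length : Int)) := by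
        simp
        omega
      have H := ih (pre ++ c :: rest.takeWhile (fun x => x == c))
      rw [← hL2, hoff, hG] at H
      have hGd : pvGroupsB (c' :: r') = g :: gs := by
        rw [← hd]
        exact hG
      rw [hGd]
      simp only [pvStartsOf, List.tail_cons, List.cons_append, List.zip_cons_cons,
        List.flatMap_cons] at H ⊢
      rw [show pvTok (pre ++ c :: rest)
            ((pre.length : Int), (pre.length : Int)
              + (1 + ((rest.takeWhile (fun x => x == c)).length : Int)))
          = pvRender1 (c, 1 + ((rest.takeWhile (fun x => x == c)).length : Int)) by
        simp [pvTok, pvRender1, hc], H]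

-- B's port renders exactly the groups
lemma pvAlt_eq (s : String) :
    compress_binary_alt s = String.mk ((pvGroupsB s.toList).flatMap pvRender1) := by
  simp only [compress_binary_alt]
  have hstarts : (PySem.List.pyRange 0 ((s.toList.length : Int)) 1).filter (pvP s.toList)
      = pvStartsOf 0 (pvGroupsB s.toList) := by
    have H := pvSA_eq s.toList []
    simp only [List.nil_append, List.length_nil, Nat.cast_zero, List.getLast?_nil] at H
    rw [H, pvSA_groups]
    intro c r _
    simp
  rw [PySem.List.slice_from_one, hstarts,
    PySem.List.foldl_append_eq_flatMap (g := pvTok s.toList)]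
  have H := pvRZ s.toList []
  simp only [List.nil_append, List.length_nil, Nat.cast_zero] at H
  rw [H]
  rfl

-- ===== VERDICT (by name: the statement is the Claim_ definition above) =====
theorem compress_binary_spec : Claim_equal_compress_binary := by
  intro s _ hpre
  unfold Spec_compress_binary
  rw [pvAlt_eq]
  unfold compress_binary
  have hne : s.toList ≠ [] := by
    intro h
    exact hpre (String.toList_eq_nil_iff.mp h)
  obtain ⟨c, rest, hl⟩ : ∃ c rest, s.toList = c :: rest := by
    cases hx : s.toList with
    | nil => exact absurd hx hne
    | cons a t => exact ⟨a, t, rfl⟩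
  rw [hl]
  have hlast : PySem.List.pyGet? (c :: rest) (-1) = some ((c :: rest).getLastD ' ') := by
    rw [PySem.List.pyGet?_neg_one]
    cases hg : (c :: rest).getLast? with
    | none => exact absurd (List.getLast?_eq_none_iff.mp hg) (by simp)
    | some y => rw [List.getLastD_eq_getLast?, hg]; rfl
  simp only [hlast]
  have hfold := pvFoldA rest [] c [] 1
  simp only [List.nil_append, List.length_nil, Nat.cast_zero, zero_add] at hfold
  rw [hfold]
  show String.mk ((pvGroupsFrom c 1 rest).foldl (fun acc p => acc ++ pvRender1 p) []) = _
  rw [PySem.List.foldl_append_eq_flatMap (g := pvRender1), pvGroupsFrom_eq rest c 1,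
    ← pvGroupsB]
  rfl

@[simp] theorem compress_binary_raises : Claim_raises_compress_binary := by
  unfold Claim_raises_compress_binary
  refine ⟨fun s _ hr hp => hp hr, by decide, by decide, ?_⟩
  rw [pvAlt_eq, show (pvRaiseWitness_compress_binary).toList = [] from rfl,
    show pvGroupsB [] = [] from by rw [pvGroupsB]]
  rfl
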